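-- pv_equiv track=rewrite | github.com/richardahoffman/replication-bundle-v1 | code/run_all.py | warn_unknown_values
-- ===== SOURCE A (Python) =====
-- def warn_unknown_values(rows: list[dict], col: str, allowed: set[str]) -> list[str]:
--     warnings = []
--     seen = set()
--     for r in rows:
--         v = (r.get(col) or "").strip()
--         if v and v not in allowed:
--             seen.add(v)
--     if seen:
--         warnings.append(f"{col}: found {len(seen)} value(s) not in recommended set: {sorted(seen)}")
--     return warnings
-- ===== SOURCE B (Python) =====
-- def warn_unknown_values(rows: list[dict], col: str, allowed: set[str]) -> list[str]:
--     vals = sorted((r.get(col) or "").strip() for r in rows)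
--     unknown = []
--     for v in vals:
--         if v and v not in allowed and (not unknown or unknown[-1] != v):
--             unknown.append(v)
--     if not unknown:
--         return []
--     return [f"{col}: found {len(unknown)} value(s) not in recommended set: {unknown}"]
-- ===== Notes on version B (the rewrite author's own statement) =====
-- stated objective: alternative
-- what changed: A accumulates unknown values in a mutable hash set and sorts it at the end; B sorts all stripped column values first and builds the sorted unknown list in one linear scan, suppressing duplicates by comparing each value with the last element appended (no set at all).
import Mathlib
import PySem

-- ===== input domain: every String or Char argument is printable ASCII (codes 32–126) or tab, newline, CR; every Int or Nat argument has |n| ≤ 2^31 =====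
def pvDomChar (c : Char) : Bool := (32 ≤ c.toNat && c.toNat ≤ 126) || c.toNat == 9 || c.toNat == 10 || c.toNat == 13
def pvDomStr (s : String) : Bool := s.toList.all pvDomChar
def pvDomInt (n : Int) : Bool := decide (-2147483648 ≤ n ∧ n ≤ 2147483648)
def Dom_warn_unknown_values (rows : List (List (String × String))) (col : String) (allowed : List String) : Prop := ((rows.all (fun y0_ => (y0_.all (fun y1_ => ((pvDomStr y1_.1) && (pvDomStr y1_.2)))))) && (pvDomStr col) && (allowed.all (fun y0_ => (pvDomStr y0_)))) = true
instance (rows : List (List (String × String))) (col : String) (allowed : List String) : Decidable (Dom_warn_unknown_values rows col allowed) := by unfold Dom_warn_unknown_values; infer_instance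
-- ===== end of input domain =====

-- B sorts the stripped column values first and builds the sorted unknown list in one
-- scan with adjacent-duplicate suppression, instead of A's hash-set accumulation
-- followed by a final sort (objective: alternative); same return value.

-- shared helpers: Python repr of a string / the f-string message (exact on the Dom ASCII range)
def pyReprChar (q : Char) (c : Char) : List Char :=
  if c = '\\' then ['\\', '\\']
  else if c = '\t' then ['\\', 't']
  else if c = '\n' then ['\\', 'n']
  else if c = '\r' then ['\\', 'r']
  else if c = q then ['\\', q]
  else [c]

def pyRepr (s : String) : String :=
  let cs := s.toList
  let q : Char := if cs.contains '\'' && !cs.contains '"' then '"' else '\''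
  String.ofList (q :: (cs.flatMap (pyReprChar q) ++ [q]))

def pvMsg (col : String) (n : Int) (xs : List String) : String :=
  col ++ ": found " ++ PySem.Int.toStr n ++ " value(s) not in recommended set: ["
      ++ String.intercalate ", " (xs.map pyRepr) ++ "]"

-- ===== PORT A =====
def warn_unknown_values (rows : List (List (String × String))) (col : String) (allowed : List String) : List String :=
  let seen : PySem.Set String := rows.foldl (fun seen r =>
    let v := PySem.Str.strip ((PySem.Dict.get? (PySem.Dict.mk r) col).getD "")
    if v ≠ "" ∧ v ∉ allowed then PySem.Set.add seen v else seen) PySem.Set.empty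
  if seen ≠ [] then [pvMsg col (PySem.Set.len seen) (PySem.List.sorted seen (fun x => x))] else []

-- ===== PORT B =====
def warn_unknown_values_alt (rows : List (List (String × String))) (col : String) (allowed : List String) : List String :=
  let vals := PySem.List.sorted (rows.map (fun r =>
    PySem.Str.strip ((PySem.Dict.get? (PySem.Dict.mk r) col).getD ""))) (fun x => x)
  let unknown := vals.foldl (fun unknown v =>
    if v ≠ "" ∧ v ∉ allowed ∧ (unknown = [] ∨ unknown.getLast? ≠ some v)
    then unknown ++ [v] else unknown) []
  if unknown = [] then []
  else [pvMsg col (unknown.length : Int) unknown]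

-- ===== PRECONDITION & SPEC =====
def Spec_warn_unknown_values (rows : List (List (String × String))) (col : String) (allowed : List String) (out : List String) : Prop := out = warn_unknown_values_alt rows col allowed
instance (rows : List (List (String × String))) (col : String) (allowed : List String) (out : List String) : Decidable (Spec_warn_unknown_values rows col allowed out) := by unfold Spec_warn_unknown_values; infer_instance

-- ===== CLAIM (what is proved, stated in full; the proofs are below) =====
def Claim_equal_warn_unknown_values : Prop := ∀ (rows : List (List (String × String))) (col : String) (allowed : List String), Dom_warn_unknown_values rows col allowed → Spec_warn_unknown_values rows col allowed (warn_unknown_values rows col allowed)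

-- ===== LEMMAS AND PROOFS =====

-- the per-row extracted value
def pvVal (col : String) (r : List (String × String)) : String :=
  PySem.Str.strip ((PySem.Dict.get? (PySem.Dict.mk r) col).getD "")

-- B's scan step
def pvStep (allowed : List String) (acc : List String) (v : String) : List String :=
  if v ≠ "" ∧ v ∉ allowed ∧ (acc = [] ∨ acc.getLast? ≠ some v) then acc ++ [v] else acc

-- membership in A's accumulated set
lemma memA (col : String) (allowed : List String) :
    ∀ (rows : List (List (String × String))) (s : PySem.Set String) (x : String),
      x ∈ rows.foldl (fun seen r =>
        let v := PySem.Str.strip ((PySem.Dict.get? (PySem.Dict.mk r) col).getD "")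
        if v ≠ "" ∧ v ∉ allowed then PySem.Set.add seen v else seen) s
      ↔ x ∈ s ∨ ((∃ r ∈ rows, pvVal col r = x) ∧ x ≠ "" ∧ x ∉ allowed) := by
  intro rows
  induction rows with
  | nil => intro s x; simp
  | cons r rows ih =>
    intro s x
    simp only [List.foldl_cons]
    rw [ih]
    by_cases h : pvVal col r ≠ "" ∧ pvVal col r ∉ allowed
    · simp only [pvVal] at h
      rw [if_pos h]
      rw [PySem.Set.mem_add]
      constructor
      · rintro ((hs | he) | hr)
        · exact Or.inl hs
        · exact Or.inr ⟨⟨r, List.mem_cons_self, he.symm⟩, he ▸ h.1, he ▸ h.2⟩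
        · exact Or.inr ⟨⟨hr.1.choose, List.mem_cons_of_mem _ hr.1.choose_spec.1, hr.1.choose_spec.2⟩, hr.2⟩
      · rintro (hs | ⟨⟨r', hr', hv'⟩, hx⟩)
        · exact Or.inl (Or.inl hs)
        · rcases List.mem_cons.mp hr' with h' | h'
          · exact Or.inl (Or.inr (h' ▸ hv'.symm))
          · exact Or.inr ⟨⟨r', h', hv'⟩, hx⟩
    · simp only [pvVal] at h
      rw [if_neg h]
      constructor
      · rintro (hs | hr); · exact Or.inl hs
        exact Or.inr ⟨⟨hr.1.choose, List.mem_cons_of_mem _ hr.1.choose_spec.1, hr.1.choose_spec.2⟩, hr.2⟩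
      · rintro (hs | ⟨⟨r', hr', hv'⟩, hx⟩)
        · exact Or.inl hs
        · rcases List.mem_cons.mp hr' with h' | h'
          · refine absurd ?_ h
            show pvVal col r ≠ "" ∧ pvVal col r ∉ allowed
            rw [← h', hv']; exact hx
          · exact Or.inr ⟨⟨r', h', hv'⟩, hx⟩

lemma nodupA (col : String) (allowed : List String) :
    ∀ (rows : List (List (String × String))) (s : PySem.Set String), s.Nodup →
      (rows.foldl (fun seen r =>
        let v := PySem.Str.strip ((PySem.Dict.get? (PySem.Dict.mk r) col).getD "")
        if v ≠ "" ∧ v ∉ allowed then PySem.Set.add seen v else seen) s).Nodup := by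
  intro rows
  induction rows with
  | nil => intro s h; simpa using h
  | cons r rows ih =>
    intro s h
    simp only [List.foldl_cons]
    apply ih
    split_ifs
    · exact PySem.Set.nodup_add _ _ h
    · exact h

-- membership in B's scan result
lemma memB (allowed : List String) :
    ∀ (l : List String) (acc : List String) (x : String),
      x ∈ l.foldl (pvStep allowed) acc ↔ x ∈ acc ∨ (x ∈ l ∧ x ≠ "" ∧ x ∉ allowed) := by
  intro l
  induction l with
  | nil => intro acc x; simp
  | cons v t ih =>
    intro acc x
    simp only [List.foldl_cons]
    rw [ih]
    unfold pvStep
    split_ifs with h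
    · simp only [List.mem_append, List.mem_cons, List.not_mem_nil, or_false]
      constructor
      · rintro ((hx | rfl) | hx)
        · exact Or.inl hx
        · exact Or.inr ⟨Or.inl rfl, h.1, h.2.1⟩
        · exact Or.inr ⟨Or.inr hx.1, hx.2⟩
      · rintro (hx | ⟨rfl | hx, hp⟩)
        · exact Or.inl (Or.inl hx)
        · exact Or.inl (Or.inr rfl)
        · exact Or.inr ⟨hx, hp⟩
    · rw [not_and_or, not_and_or, not_or] at h
      simp only [List.mem_cons]
      constructor
      · rintro (hx | hx)
        · exact Or.inl hx
        · exact Or.inr ⟨Or.inr hx.1, hx.2⟩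
      · rintro (hx | ⟨rfl | hx, hp⟩)
        · exact Or.inl hx
        · -- v was skipped: either not P v (contradiction) or v is acc's last element
          rcases h with h1 | h2 | h3
          · exact absurd hp.1 h1
          · exact absurd hp.2 h2
          · exact Or.inl (List.mem_of_getLast? (not_not.mp h3.2))
        · exact Or.inr ⟨hx, hp⟩

-- every element of a strictly increasing list is ≤ its last element
lemma le_getLast : ∀ (l : List String) (m : String), l.Pairwise (· < ·) →
    l.getLast? = some m → ∀ a ∈ l, a ≤ m := by
  intro l
  induction l with
  | nil => intro m _ h; simp at h
  | cons b t ih =>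
    intro m hp hl a ha
    cases t with
    | nil =>
      simp at hl ha; simp [ha, hl]
    | cons c u =>
      rw [List.getLast?_cons_cons] at hl
      rcases List.mem_cons.mp ha with rfl | ha
      · have hm : m ∈ c :: u := List.mem_of_getLast? hl
        exact le_of_lt ((List.pairwise_cons.mp hp).1 m hm)
      · exact ih m (List.pairwise_cons.mp hp).2 hl a ha

-- B's scan preserves strict increase when fed a ≤-sorted list
lemma pairwiseB (allowed : List String) :
    ∀ (l : List String) (acc : List String), l.Pairwise (· ≤ ·) →
      acc.Pairwise (· < ·) → (∀ a ∈ acc, ∀ v ∈ l, a ≤ v) →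
      (l.foldl (pvStep allowed) acc).Pairwise (· < ·) := by
  intro l
  induction l with
  | nil => intro acc _ h _; simpa using h
  | cons v t ih =>
    intro acc hl hacc hle
    simp only [List.foldl_cons]
    have hvst := List.pairwise_cons.mp hl
    apply ih _ hvst.2
    · unfold pvStep
      split_ifs with h
      · rw [List.pairwise_append]
        refine ⟨hacc, List.pairwise_singleton _ _, ?_⟩
        intro a ha b hb
        rw [List.mem_singleton] at hb; subst hb
        have hle' := hle a ha b List.mem_cons_self
        rcases lt_or_eq_of_le hle' with hlt | rfl
        · exact hlt
        · -- a = v ∈ acc, so acc ≠ [], and acc.getLast? ≠ some v yet last ≥ v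
          rcases h.2.2 with hnil | hne
          · exact absurd (hnil ▸ ha) (List.not_mem_nil)
          · rcases Option.isSome_iff_exists.mp (List.getLast?_isSome.mpr (List.ne_nil_of_mem ha)) with ⟨m, hm⟩
            have h1 : a ≤ m := le_getLast acc m hacc hm a ha
            have h2 : m ≤ a := hle m (List.mem_of_getLast? hm) a List.mem_cons_self
            exact absurd (hm.trans (by rw [le_antisymm h1 h2])) hne
      · exact hacc
    · intro a ha w hw
      unfold pvStep at ha
      split_ifs at ha with h
      · rcases List.mem_append.mp ha with ha | ha
        · exact hle a ha w (List.mem_cons_of_mem _ hw)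
        · rw [List.mem_singleton] at ha; subst ha
          exact hvst.1 w hw
      · exact hle a ha w (List.mem_cons_of_mem _ hw)

-- ===== VERDICT (by name: the statement is the Claim_ definition above) =====
theorem warn_unknown_values_spec : Claim_equal_warn_unknown_values := by
  intro rows col allowed _
  unfold Spec_warn_unknown_values warn_unknown_values warn_unknown_values_alt
  dsimp only
  have hstep : (PySem.List.sorted (rows.map (fun r =>
        PySem.Str.strip ((PySem.Dict.get? (PySem.Dict.mk r) col).getD ""))) (fun x => x)).foldl
        (fun unknown v =>
          if v ≠ "" ∧ v ∉ allowed ∧ (unknown = [] ∨ unknown.getLast? ≠ some v)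
          then unknown ++ [v] else unknown) []
      = (PySem.List.sorted (rows.map (fun r =>
        PySem.Str.strip ((PySem.Dict.get? (PySem.Dict.mk r) col).getD ""))) (fun x => x)).foldl
        (pvStep allowed) [] := rfl
  rw [hstep]
  have hpw : ((PySem.List.sorted (rows.map (fun r =>
        PySem.Str.strip ((PySem.Dict.get? (PySem.Dict.mk r) col).getD ""))) (fun x => x)).foldl
        (pvStep allowed) []).Pairwise (· < ·) :=
    pairwiseB allowed _ [] (PySem.List.sorted_pairwise _ _) List.Pairwise.nil (by simp)
  have hperm : ((PySem.List.sorted (rows.map (fun r =>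
        PySem.Str.strip ((PySem.Dict.get? (PySem.Dict.mk r) col).getD ""))) (fun x => x)).foldl
        (pvStep allowed) []).Perm
      (rows.foldl (fun seen r =>
        let v := PySem.Str.strip ((PySem.Dict.get? (PySem.Dict.mk r) col).getD "")
        if v ≠ "" ∧ v ∉ allowed then PySem.Set.add seen v else seen) PySem.Set.empty) := by
    apply (List.perm_ext_iff_of_nodup (hpw.imp ne_of_lt)
      (nodupA col allowed rows PySem.Set.empty (by simp [PySem.Set.empty]))).mpr
    intro x
    rw [memB allowed _ [] x, memA col allowed rows PySem.Set.empty x, PySem.List.mem_sorted]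
    simp only [List.mem_map, PySem.Set.empty, List.not_mem_nil, false_or]
    constructor
    · rintro ⟨⟨r, hr, hv⟩, hp⟩; exact ⟨⟨r, hr, hv⟩, hp⟩
    · rintro ⟨⟨r, hr, hv⟩, hp⟩; exact ⟨⟨r, hr, hv⟩, hp⟩
  have hsorted := PySem.List.sorted_eq_of_perm_of_pairwise_lt _ _ (fun x : String => x) hperm hpw
  by_cases hnil : (PySem.List.sorted (rows.map (fun r =>
        PySem.Str.strip ((PySem.Dict.get? (PySem.Dict.mk r) col).getD ""))) (fun x => x)).foldl
        (pvStep allowed) [] = []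
  · rw [if_pos hnil, if_neg]
    simp only [ne_eq, not_not]
    exact List.length_eq_zero_iff.mp (by rw [← hperm.length_eq, hnil]; rfl)
  · rw [if_neg hnil, if_pos]
    · rw [hsorted]
      have hlen : PySem.Set.len (rows.foldl (fun seen r =>
          let v := PySem.Str.strip ((PySem.Dict.get? (PySem.Dict.mk r) col).getD "")
          if v ≠ "" ∧ v ∉ allowed then PySem.Set.add seen v else seen) PySem.Set.empty)
          = (((PySem.List.sorted (rows.map (fun r =>
              PySem.Str.strip ((PySem.Dict.get? (PySem.Dict.mk r) col).getD ""))) (fun x => x)).foldl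
              (pvStep allowed) []).length : Int) := by
        simp only [PySem.Set.len, hperm.length_eq]
      rw [hlen]
    · intro h
      exact hnil (List.length_eq_zero_iff.mp (by rw [hperm.length_eq, h]; rfl))
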